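-- pv_equiv track=rewrite | github.com/jhonataplt/Prog-02 | tuplas/exercicios-aulas01e02/ex_03.py | pontosAlinhados
-- ===== SOURCE A (Python) =====
-- def determinante(matriz):
--     principal = int(0)
--     secundaria = int(0)
--     for linha in range(len(matriz[0])):
--         for coluna in range(len(matriz[:2])):
--             matriz[linha].append(matriz[linha][coluna])
--     for i in range(len(matriz)):
--         coluna = i
--         diagonal = 1
--         for linha in range(len(matriz)):
--             diagonal *= matriz[linha][coluna]
--             coluna += 1
--         principal += diagonal
--     for i in range(len(matriz[0])-1, 1, -1):
--         coluna = i
--         diagonal = 1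
--         for linha in range(len(matriz)):
--             diagonal *= matriz[linha][coluna]
--             coluna -= 1
--         secundaria -= diagonal
--     return principal + secundaria
--
-- def pontosAlinhados(pontoA, pontoB, pontoC):
--     lista = [pontoA, pontoB, pontoC]
--     matriz = []
--     for ponto in lista:
--         linha = []
--         for elemento in ponto:
--             linha.append(elemento)
--         linha.append(1)
--         matriz.append(linha)
--     return determinante(matriz) == 0
-- ===== SOURCE B (Python) =====
-- def pontosAlinhados(pontoA, pontoB, pontoC):
--     xA, yA = pontoA
--     xB, yB = pontoB
--     xC, yC = pontoC
--     return (xB - xA) * (yC - yA) - (yB - yA) * (xC - xA) == 0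
-- ===== Notes on version B (the rewrite author's own statement) =====
-- stated objective: simpler
-- what changed: B replaces the matrix construction and Sarrus diagonal loops with the closed-form 2D cross product (xB-xA)*(yC-yA)-(yB-yA)*(xC-xA) == 0.
import Mathlib
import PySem

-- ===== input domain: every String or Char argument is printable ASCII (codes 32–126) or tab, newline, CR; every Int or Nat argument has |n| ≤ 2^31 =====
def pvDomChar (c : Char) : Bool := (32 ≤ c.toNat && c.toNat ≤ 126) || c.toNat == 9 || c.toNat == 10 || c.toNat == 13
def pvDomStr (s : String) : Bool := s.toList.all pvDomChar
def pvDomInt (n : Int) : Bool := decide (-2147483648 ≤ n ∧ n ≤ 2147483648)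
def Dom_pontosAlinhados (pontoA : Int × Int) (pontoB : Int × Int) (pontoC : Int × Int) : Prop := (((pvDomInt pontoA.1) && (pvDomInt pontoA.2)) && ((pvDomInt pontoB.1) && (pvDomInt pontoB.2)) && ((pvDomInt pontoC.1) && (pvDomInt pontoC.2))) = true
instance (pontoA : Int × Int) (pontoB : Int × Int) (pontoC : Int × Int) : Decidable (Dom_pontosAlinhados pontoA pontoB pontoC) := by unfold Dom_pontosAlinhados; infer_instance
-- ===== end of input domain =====

-- B drops A's matrix construction and Sarrus diagonal loops and tests the closed-form
-- 2D cross product instead (objective: simpler; exact over Int, so the == 0 test agrees).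

-- ===== PORT A =====
-- Literal port of `determinante`: the state of each Python loop is carried by a foldl over
-- the same range; the diagonal loops carry the (diagonal, coluna) pair. All list indices
-- this function uses at its call site (a 3×3 matrix) are nonnegative and in range, so
-- `getD`/`toNat` is exact there (Python raises only outside that use).
def determinante (matriz : List (List Int)) : Int :=
  -- for linha in range(len(matriz[0])): for coluna in range(len(matriz[:2])): matriz[linha].append(matriz[linha][coluna])
  let m := (PySem.List.pyRange 0 (Int.ofNat (matriz.getD 0 []).length) 1).foldl
    (fun m linha =>
      (PySem.List.pyRange 0 (Int.ofNat (PySem.List.slice m (some 0) (some 2)).length) 1).foldl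
        (fun m coluna =>
          let row := m.getD linha.toNat []
          m.set linha.toNat (row ++ [row.getD coluna.toNat 0])) m) matriz
  -- principal loop
  let principal := (PySem.List.pyRange 0 (Int.ofNat m.length) 1).foldl
    (fun principal i =>
      let d := (PySem.List.pyRange 0 (Int.ofNat m.length) 1).foldl
        (fun (p : Int × Int) linha =>
          (p.1 * ((m.getD linha.toNat []).getD p.2.toNat 0), p.2 + 1)) ((1 : Int), i)
      principal + d.1) 0
  -- secondary loop: range(len(matriz[0])-1, 1, -1)
  let secundaria := (PySem.List.pyRange (Int.ofNat (m.getD 0 []).length - 1) 1 (-1)).foldl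
    (fun secundaria i =>
      let d := (PySem.List.pyRange 0 (Int.ofNat m.length) 1).foldl
        (fun (p : Int × Int) linha =>
          (p.1 * ((m.getD linha.toNat []).getD p.2.toNat 0), p.2 - 1)) ((1 : Int), i)
      secundaria - d.1) 0
  principal + secundaria

def pontosAlinhados (pontoA : Int × Int) (pontoB : Int × Int) (pontoC : Int × Int) : Bool :=
  -- for ponto in lista: linha = [elements of ponto]; linha.append(1); matriz.append(linha)
  let matriz := [pontoA, pontoB, pontoC].foldl
    (fun matriz ponto =>
      let linha := ([ponto.1, ponto.2].foldl (fun l e => l ++ [e]) []) ++ [1]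
      matriz ++ [linha]) []
  determinante matriz == 0

-- ===== PORT B =====
def pontosAlinhados_alt (pontoA : Int × Int) (pontoB : Int × Int) (pontoC : Int × Int) : Bool :=
  (pontoB.1 - pontoA.1) * (pontoC.2 - pontoA.2) - (pontoB.2 - pontoA.2) * (pontoC.1 - pontoA.1) == 0

-- ===== PRECONDITION & SPEC =====
def Spec_pontosAlinhados (pontoA : Int × Int) (pontoB : Int × Int) (pontoC : Int × Int) (out : Bool) : Prop := out = pontosAlinhados_alt pontoA pontoB pontoC
instance (pontoA : Int × Int) (pontoB : Int × Int) (pontoC : Int × Int) (out : Bool) : Decidable (Spec_pontosAlinhados pontoA pontoB pontoC out) := by unfold Spec_pontosAlinhados; infer_instance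

-- ===== CLAIM (what is proved, stated in full; the proofs are below) =====
def Claim_equal_pontosAlinhados : Prop := ∀ (pontoA : Int × Int) (pontoB : Int × Int) (pontoC : Int × Int), Dom_pontosAlinhados pontoA pontoB pontoC → Spec_pontosAlinhados pontoA pontoB pontoC (pontosAlinhados pontoA pontoB pontoC)

-- ===== LEMMAS AND PROOFS =====
theorem det_eq_cross (xA yA xB yB xC yC : Int) :
    determinante [[xA, yA, 1], [xB, yB, 1], [xC, yC, 1]]
      = (xB - xA) * (yC - yA) - (yB - yA) * (xC - xA) := by
  have h : PySem.List.pyRange 4 1 (-1) = [4, 3, 2] := by decide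
  simp [determinante, PySem.List.pyRange_one, PySem.List.slice, List.range_succ, h]
  ring

-- ===== VERDICT (by name: the statement is the Claim_ definition above) =====
theorem pontosAlinhados_spec : Claim_equal_pontosAlinhados := by
  rintro ⟨xA, yA⟩ ⟨xB, yB⟩ ⟨xC, yC⟩ _
  unfold Spec_pontosAlinhados pontosAlinhados pontosAlinhados_alt
  simp only [List.foldl, List.nil_append, List.cons_append]
  rw [det_eq_cross]
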